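-- pv_equiv track=rewrite | github.com/matijapretnar/uvod-v-programiranje | 07-slovarji-in-mnozice/prestej.py | stevilo_posameznih_samoglasnikov
-- ===== SOURCE A (Python) =====
-- def je_samoglasnik(niz):
--     return len(niz) == 1 and niz.lower() in 'aeiou'
--
-- def stevilo_posameznih_samoglasnikov(niz):
--     samoglasniki = {}
--     for crka in niz:
--         mala_crka = crka.lower()
--         if je_samoglasnik(crka):
--             if mala_crka in samoglasniki:
--                 samoglasniki[mala_crka] += 1
--             else:
--                 samoglasniki[mala_crka] = 1
--     return samoglasniki
-- ===== SOURCE B (Python) =====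
-- def stevilo_posameznih_samoglasnikov(niz):
--     lowered = [crka.lower() for crka in niz]
--     order = []
--     for c in lowered:
--         if c in 'aeiou' and c not in order:
--             order.append(c)
--     return {v: lowered.count(v) for v in order}
-- ===== Notes on version B (the rewrite author's own statement) =====
-- stated objective: alternative
-- what changed: Instead of threading a counting dict through one pass (membership test plus increment per character), B first collects the distinct lowercased vowels in first-occurrence order and then builds the result with one counting scan (list.count) per distinct vowel.
import Mathlib
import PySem

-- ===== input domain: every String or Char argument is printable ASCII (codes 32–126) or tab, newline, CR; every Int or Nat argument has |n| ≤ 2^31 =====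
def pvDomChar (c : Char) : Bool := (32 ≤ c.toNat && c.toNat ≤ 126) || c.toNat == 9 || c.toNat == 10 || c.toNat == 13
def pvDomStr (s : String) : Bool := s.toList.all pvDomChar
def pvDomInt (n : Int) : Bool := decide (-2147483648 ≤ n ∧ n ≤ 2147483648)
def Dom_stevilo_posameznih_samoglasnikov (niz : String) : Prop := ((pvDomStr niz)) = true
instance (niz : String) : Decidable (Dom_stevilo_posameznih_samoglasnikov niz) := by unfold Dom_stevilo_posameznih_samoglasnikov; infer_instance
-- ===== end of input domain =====

-- B replaces A's single dict-threading counting pass by collecting the distinct lowercased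
-- vowels in first-occurrence order and counting each with one scan (alternative decomposition).

-- ===== PORT A =====
def je_samoglasnik (niz : String) : Bool :=
  (PySem.Str.len niz == 1) && PySem.Str.isIn (PySem.Str.lower niz) "aeiou"

def stevilo_posameznih_samoglasnikov (niz : String) : List (String × Int) :=
  (niz.toList.foldl (fun (d : PySem.Dict String Int) crka =>
      let mala_crka := PySem.Str.lower (String.ofList [crka])
      if je_samoglasnik (String.ofList [crka]) then
        if d.contains mala_crka then d.insert mala_crka (d.getD mala_crka 0 + 1)
        else d.insert mala_crka 1
      else d) PySem.Dict.empty).items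

-- ===== PORT B =====
def stevilo_posameznih_samoglasnikov_alt (niz : String) : List (String × Int) :=
  let lowered := niz.toList.map (fun crka => PySem.Str.lower (String.ofList [crka]))
  let order := lowered.foldl (fun (acc : List String) c =>
      if PySem.Str.isIn c "aeiou" && !(acc.contains c) then acc ++ [c] else acc) []
  order.map (fun v => (v, (lowered.count v : Int)))

-- ===== PRECONDITION & SPEC =====
def Spec_stevilo_posameznih_samoglasnikov (niz : String) (out : List (String × Int)) : Prop := out = stevilo_posameznih_samoglasnikov_alt niz
instance (niz : String) (out : List (String × Int)) : Decidable (Spec_stevilo_posameznih_samoglasnikov niz out) := by unfold Spec_stevilo_posameznih_samoglasnikov; infer_instance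

-- ===== CLAIM (what is proved, stated in full; the proofs are below) =====
def Claim_equal_stevilo_posameznih_samoglasnikov : Prop := ∀ (niz : String), Dom_stevilo_posameznih_samoglasnikov niz → Spec_stevilo_posameznih_samoglasnikov niz (stevilo_posameznih_samoglasnikov niz)

-- ===== LEMMAS AND PROOFS =====

-- A's loop equals the Counter-building loop over the lowercased vowels of the processed chars
theorem loopA_eq (l : List Char) (d : PySem.Dict String Int) :
    l.foldl (fun (d : PySem.Dict String Int) crka =>
        let mala_crka := PySem.Str.lower (String.ofList [crka])
        if je_samoglasnik (String.ofList [crka]) then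
          if d.contains mala_crka then d.insert mala_crka (d.getD mala_crka 0 + 1)
          else d.insert mala_crka 1
        else d) d
    = ((l.map (fun crka => PySem.Str.lower (String.ofList [crka]))).filter
        (fun c => PySem.Str.isIn c "aeiou")).foldl
        (fun d x => d.insert x (d.getD x 0 + 1)) d := by
  induction l generalizing d with
  | nil => rfl
  | cons c t ih =>
    simp only [List.foldl_cons, List.map_cons, List.filter_cons]
    have hje : je_samoglasnik (String.ofList [c])
        = PySem.Str.isIn (PySem.Str.lower (String.ofList [c])) "aeiou" := by
      simp [je_samoglasnik]
    by_cases h : PySem.Str.isIn (PySem.Str.lower (String.ofList [c])) "aeiou"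
    · simp only [hje, h, if_true, List.foldl_cons]
      by_cases hc : PySem.Dict.contains d (PySem.Str.lower (String.ofList [c]))
      · simp only [hc, if_true]; exact ih _
      · simp only [hc, if_false, Bool.false_eq_true,
          PySem.Dict.getD_of_not_contains d 0 (by simpa using hc)]
        exact ih _
    · simp only [hje, h, if_false, Bool.false_eq_true]
      exact ih d

-- B's 'order' loop builds Set.ofList of the lowercased vowels
theorem order_eq_set (l : List String) :
    l.foldl (fun (acc : List String) c =>
        if PySem.Str.isIn c "aeiou" && !(acc.contains c) then acc ++ [c] else acc) []
    = PySem.Set.ofList (l.filter (fun c => PySem.Str.isIn c "aeiou")) := by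
  rw [PySem.Set.ofList_eq_foldl, ← PySem.List.foldl_if_eq_foldl_filter]
  congr 1
  funext acc c
  by_cases hv : PySem.Chars.isIn c.toList ['a', 'e', 'i', 'o', 'u']
  · by_cases hc : c ∈ acc <;>
      simp [hv, hc, PySem.Set.add, PySem.Set.contains]
  · simp [hv]

-- ===== VERDICT (by name: the statement is the Claim_ definition above) =====
theorem stevilo_posameznih_samoglasnikov_spec : Claim_equal_stevilo_posameznih_samoglasnikov := by
  intro niz _
  unfold Spec_stevilo_posameznih_samoglasnikov
  unfold stevilo_posameznih_samoglasnikov stevilo_posameznih_samoglasnikov_alt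
  rw [loopA_eq, PySem.Dict.foldl_insert_getD_add_one_eq_counter, PySem.Dict.items_counter]
  simp only [order_eq_set]
  apply List.map_congr_left
  intro v hv
  have hmem : v ∈ (niz.toList.map (fun crka => PySem.Str.lower (String.ofList [crka]))).filter
      (fun c => PySem.Str.isIn c "aeiou") := (PySem.Set.mem_ofList _ _).mp hv
  have hp : PySem.Str.isIn v "aeiou" = true := (List.mem_filter.mp hmem).2
  rw [List.count_filter (p := fun c => PySem.Str.isIn c "aeiou") hp]
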